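-- pv_equiv track=rewrite | github.com/sebaperz/project-euler-grind | 11-20/12.py | find_triangle_number_with_over_k_divisors
-- ===== SOURCE A (Python) =====
-- import math
--
-- def sieve_of_eratosthenes(limit):
--     sieve = [True] * (limit + 1)
--     sieve[0] = sieve[1] = False
--     for num in range(2, int(math.sqrt(limit)) + 1):
--         if sieve[num]:
--             sieve[num*num : limit+1 : num] = [False] * len(sieve[num*num : limit+1 : num])
--     primes = [i for i, is_prime in enumerate(sieve) if is_prime]
--     return primes
--
-- def count_divisors(n, primes):
--     if n == 1:
--         return 1
--     count = 1
--     for p in primes: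
--         if p * p > n:
--             break
--         exponent = 0
--         while n % p == 0:
--             exponent += 1
--             n = n // p
--         count *= (exponent + 1)
--     if n > 1:
--         count *= 2
--     return count
--
-- def find_triangle_number_with_over_k_divisors(k):
--     primes = sieve_of_eratosthenes(10**6)  # Adjust the limit based on expected n
--     n = 1
--     while True:
--         triangle = n * (n + 1) // 2
--         if n % 2 == 0:
--             a = n // 2
--             b = n + 1
--         else:
--             a = n
--             b = (n + 1) // 2
--         num_divisors = count_divisors(a, primes) * count_divisors(b, primes)
--         if num_divisors > k:
--             return triangle
--         n += 1
-- ===== SOURCE B (Python) =====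
-- import math
--
-- def _divisor_count(m):
--     # count divisors of m by direct enumeration up to isqrt(m)
--     r = math.isqrt(m)
--     c = 0
--     for i in range(1, r + 1):
--         if m % i == 0:
--             c += 2
--     if r * r == m:
--         c -= 1
--     return c
--
-- def _half_term(m):
--     # the coprime half of a triangle-number factor: m/2 if even else m
--     return m // 2 if m % 2 == 0 else m
--
-- def find_triangle_number_with_over_k_divisors(k):
--     # d(T_n) = d(_half_term(n)) * d(_half_term(n+1)); cache the shared factor
--     n = 1
--     prev = _divisor_count(_half_term(1))
--     while True:
--         cur = _divisor_count(_half_term(n + 1))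
--         if prev * cur > k:
--             return n * (n + 1) // 2
--         prev = cur
--         n += 1
-- ===== Notes on version B (the rewrite author's own statement) =====
-- stated objective: simpler
-- what changed: B drops A's per-call million-entry Eratosthenes sieve and trial-division prime factorization entirely: it counts divisors of each coprime half of a triangle number by direct enumeration up to the integer square root, caching the half shared between consecutive indices.
import Mathlib
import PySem

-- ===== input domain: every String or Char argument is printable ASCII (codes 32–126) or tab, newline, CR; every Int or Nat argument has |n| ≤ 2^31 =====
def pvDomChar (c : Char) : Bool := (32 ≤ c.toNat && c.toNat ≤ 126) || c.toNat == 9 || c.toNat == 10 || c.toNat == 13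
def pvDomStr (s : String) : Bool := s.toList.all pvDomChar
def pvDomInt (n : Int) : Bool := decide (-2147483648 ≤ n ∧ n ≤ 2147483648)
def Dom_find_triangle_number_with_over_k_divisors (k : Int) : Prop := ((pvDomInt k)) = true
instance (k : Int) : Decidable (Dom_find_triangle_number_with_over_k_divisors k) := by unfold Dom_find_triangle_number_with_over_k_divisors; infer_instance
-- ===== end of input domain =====

-- B replaces A's per-call 10^6 Eratosthenes sieve + trial-division factorization of the two
-- coprime halves of T_n with direct divisor enumeration up to isqrt, caching the shared half.
-- A's unbounded 'while True' loop is ported with fuel 10^10 in both ports (0 on exhaustion).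

-- ===== PORT A =====
-- All integers A manipulates are nonnegative, so the ports work in Nat; Python's
-- '//' and '%' on nonnegative operands are exactly Nat division/mod.
-- int(math.sqrt(1000000)) = 1000 exactly, ported as the literal bound 1001 of range(2, 1001).
-- The Python list of bools is ported as Array Bool (all index writes/reads are in bounds).

-- slice assignment sieve[p*p : 10^6+1 : p] = [False]*…  =  set each index of
-- range(p*p, 10^6+1, p) to false; that range, all values nonneg, is ported as
-- List.range' (p*p) ((1000000 - p*p)/p + 1) p (exact for 2 ≤ p ≤ 1000).
def pvSieveStep (s : Array Bool) (num : Nat) : Array Bool :=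
  if s.getD num false then
    (List.range' (num*num) ((1000000 - num*num)/num + 1) num).foldl
      (fun s j => s.setIfInBounds j false) s
  else s

-- sieve = [True]*(limit+1); sieve[0] = sieve[1] = False
def pvSieveBase : Array Bool :=
  ((Array.replicate 1000001 true).setIfInBounds 0 false).setIfInBounds 1 false

-- sieve_of_eratosthenes(10**6)
def pvSieve : Array Bool := (List.range' 2 999 1).foldl pvSieveStep pvSieveBase

-- [i for i, is_prime in enumerate(sieve) if is_prime]  (indices 0..len-1, as Nat)
def pvPrimes : List Nat := (List.range pvSieve.size).filter (fun i => pvSieve.getD i false)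

-- inner 'while n % p == 0' of count_divisors: returns (exponent, reduced n)
def pvDivOut (n p : Nat) : Nat × Nat :=
  if h : 2 ≤ p ∧ 0 < n ∧ n % p = 0 then
    let r := pvDivOut (n / p) p
    (r.1 + 1, r.2)
  else (0, n)
termination_by n
decreasing_by exact Nat.div_lt_self h.2.1 (by omega)

-- the 'for p in primes' loop of count_divisors (with its post-loop 'if n > 1' check)
def pvCdLoop (n count : Nat) (L : List Nat) : Nat :=
  match L with
  | [] => if 1 < n then count * 2 else count
  | p :: ps =>
    if p * p > n then (if 1 < n then count * 2 else count)
    else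
      let r := pvDivOut n p
      pvCdLoop r.2 (count * (r.1 + 1)) ps

-- count_divisors(n, primes)
def pvCountDivisors (n : Nat) (primes : List Nat) : Nat :=
  if n = 1 then 1 else pvCdLoop n 1 primes

-- the 'while True' loop; fuel 10^10 totalizes it (0 returned on exhaustion)
def pvLoopA (k : Int) : Nat → Nat → Int
  | 0, _ => 0
  | fuel+1, n =>
    let triangle := n * (n + 1) / 2
    let ab := if n % 2 = 0 then (n / 2, n + 1) else (n, (n + 1) / 2)
    let nd := pvCountDivisors ab.1 pvPrimes * pvCountDivisors ab.2 pvPrimes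
    if k < (nd : Int) then (triangle : Int) else pvLoopA k fuel (n + 1)

def find_triangle_number_with_over_k_divisors (k : Int) : Int :=
  pvLoopA k 10000000000 1

-- ===== PORT B =====
-- _divisor_count(m): direct divisor enumeration up to isqrt(m);  math.isqrt = Nat.sqrt
def pvDivisorCount (m : Nat) : Nat :=
  let r := Nat.sqrt m
  let c := (List.range' 1 r 1).foldl (fun c i => if m % i = 0 then c + 2 else c) 0
  if r * r = m then c - 1 else c

-- _half_term(m)
def pvHalfTerm (m : Nat) : Nat := if m % 2 = 0 then m / 2 else m

-- the 'while True' loop of B with its cached previous half; same fuel totalization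
def pvLoopB (k : Int) : Nat → Nat → Nat → Int
  | 0, _, _ => 0
  | fuel+1, n, prev =>
    let cur := pvDivisorCount (pvHalfTerm (n + 1))
    if k < (prev * cur : Nat) then (n * (n + 1) / 2 : Nat) else pvLoopB k fuel (n + 1) cur

def find_triangle_number_with_over_k_divisors_alt (k : Int) : Int :=
  pvLoopB k 10000000000 1 (pvDivisorCount (pvHalfTerm 1))

-- ===== PRECONDITION & SPEC =====
def Spec_find_triangle_number_with_over_k_divisors (k : Int) (out : Int) : Prop := out = find_triangle_number_with_over_k_divisors_alt k
instance (k : Int) (out : Int) : Decidable (Spec_find_triangle_number_with_over_k_divisors k out) := by unfold Spec_find_triangle_number_with_over_k_divisors; infer_instance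

-- ===== CLAIM (what is proved, stated in full; the proofs are below) =====
def Claim_equal_find_triangle_number_with_over_k_divisors : Prop := ∀ (k : Int), Dom_find_triangle_number_with_over_k_divisors k → Spec_find_triangle_number_with_over_k_divisors k (find_triangle_number_with_over_k_divisors k)

-- ===== LEMMAS AND PROOFS =====

-- ---------- generic array/fold facts ----------
lemma pv_getD_set (a : Array Bool) (t j : Nat) (v d : Bool) :
    (a.setIfInBounds t v).getD j d = if j = t ∧ j < a.size then v else a.getD j d := by
  rw [Array.getD_eq_getD_getElem?, Array.getD_eq_getD_getElem?, Array.getElem?_setIfInBounds]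
  by_cases ht : j = t
  · subst ht
    by_cases hs : j < a.size <;> simp [hs]
  · simp [Ne.symm ht, ht]

lemma pv_foldSet_size (idxs : List Nat) (a : Array Bool) :
    (idxs.foldl (fun s t => s.setIfInBounds t false) a).size = a.size := by
  induction idxs generalizing a with
  | nil => rfl
  | cons t ts ih => simp [List.foldl_cons, ih, Array.size_setIfInBounds]

lemma pv_foldSet_getD (idxs : List Nat) (a : Array Bool) (j : Nat) :
    (idxs.foldl (fun s t => s.setIfInBounds t false) a).getD j false =
      if j ∈ idxs ∧ j < a.size then false else a.getD j false := by
  induction idxs generalizing a with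
  | nil => simp
  | cons t ts ih =>
    rw [List.foldl_cons, ih, pv_getD_set, Array.size_setIfInBounds]
    by_cases hm : j ∈ ts <;> by_cases ht : j = t <;> by_cases hs : j < a.size <;>
      simp [hm, ht, hs] <;> tauto

-- ---------- sieve correctness ----------
lemma pv_mem_innerRange (p j : Nat) (hp : 2 ≤ p) (hp2 : p * p ≤ 1000000) :
    j ∈ List.range' (p*p) ((1000000 - p*p)/p + 1) p ↔ p * p ≤ j ∧ j ≤ 1000000 ∧ p ∣ j := by
  rw [List.mem_range']
  constructor
  · rintro ⟨i, hi, rfl⟩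
    have hip : i ≤ (1000000 - p*p)/p := by omega
    have h1 : p * i ≤ 1000000 - p*p :=
      calc p * i ≤ p * ((1000000 - p*p)/p) := Nat.mul_le_mul_left _ hip
        _ = ((1000000 - p*p)/p) * p := Nat.mul_comm _ _
        _ ≤ 1000000 - p*p := Nat.div_mul_le_self _ _
    exact ⟨by omega, by omega, ⟨p + i, by ring⟩⟩
  · rintro ⟨h1, h2, c, rfl⟩
    have hpc : p ≤ c := Nat.le_of_mul_le_mul_left h1 (by omega)
    have hsplit : p * c = p * p + p * (c - p) := by
      have h := Nat.mul_add p p (c - p)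
      rw [← h, Nat.add_sub_cancel' hpc]
    have hle : (c - p) * p ≤ 1000000 - p * p := by
      rw [Nat.mul_comm]; omega
    have : c - p ≤ (1000000 - p*p)/p := Nat.le_div_iff_mul_le (by omega) |>.mpr hle
    exact ⟨c - p, by omega, by omega⟩

lemma pv_base_size : pvSieveBase.size = 1000001 := by
  unfold pvSieveBase
  rw [Array.size_setIfInBounds, Array.size_setIfInBounds, Array.size_replicate]

lemma pv_base_getD (j : Nat) (hj : j ≤ 1000000) :
    (pvSieveBase.getD j false = false ↔ j < 2) := by
  unfold pvSieveBase
  rw [pv_getD_set, pv_getD_set, Array.size_setIfInBounds, Array.size_replicate,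
    Array.getD_eq_getD_getElem?, Array.getElem?_replicate,
    if_pos (by omega : j < 1000001), Option.getD_some]
  constructor
  · intro hf
    by_cases h0 : j = 0
    · omega
    · by_cases h1 : j = 1
      · omega
      · rw [if_neg (by omega), if_neg (by omega)] at hf
        exact absurd hf (by simp)
  · intro h2
    by_cases h1 : j = 1
    · rw [if_pos (by omega)]
    · rw [if_neg (by omega), if_pos (by omega)]

lemma pv_sieve_inv : ∀ m, m ≤ 999 →
    ((List.range' 2 m 1).foldl pvSieveStep pvSieveBase).size = 1000001 ∧ ∀ j ≤ 1000000,
      (((List.range' 2 m 1).foldl pvSieveStep pvSieveBase).getD j false = false ↔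
        j < 2 ∨ ∃ q, Nat.Prime q ∧ q < 2 + m ∧ q ∣ j ∧ q * q ≤ j) := by
  intro m
  induction m with
  | zero =>
    intro _
    rw [List.range'_zero, List.foldl_nil]
    refine ⟨pv_base_size, ?_⟩
    intro j hj
    rw [pv_base_getD j hj]
    constructor
    · exact Or.inl
    · rintro (h2 | ⟨q, hq, hq2, _⟩)
      · exact h2
      · exact absurd hq2 (by have := hq.two_le; omega)
  | succ m ihm =>
    intro hm
    have hm' : m ≤ 999 := by omega
    obtain ⟨hsz, hch⟩ := ihm hm'
    set p := 2 + m with hpdef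
    have hrange : List.range' 2 (m+1) 1 = List.range' 2 m 1 ++ [p] := by
      have := List.range'_concat (s := 2) (n := m) (step := 1)
      simpa [hpdef] using this
    rw [hrange, List.foldl_append]
    set s := (List.range' 2 m 1).foldl pvSieveStep pvSieveBase with hs
    simp only [List.foldl_cons, List.foldl_nil]
    unfold pvSieveStep
    have hp1000 : p ≤ 1000 := by omega
    have hpsq : p * p ≤ 1000000 := by
      have := Nat.mul_le_mul hp1000 hp1000; omega
    by_cases hsp : s.getD p false = true
    · -- p is still marked: p is prime, and the inner loop marks its multiples
      rw [if_pos hsp]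
      have hpp : Nat.Prime p := by
        by_contra hnp
        have hq := Nat.minFac_prime (by omega : p ≠ 1)
        have hqd := Nat.minFac_dvd p
        have hqsq : p.minFac * p.minFac ≤ p := by
          simpa [Nat.pow_two] using Nat.minFac_sq_le_self (by omega) hnp
        have hqlt : p.minFac < p := by
          have h2q := hq.two_le
          by_contra hge
          push_neg at hge
          have : p * 2 ≤ p.minFac * p.minFac := Nat.mul_le_mul hge (by omega)
          omega
        have hfalse := (hch p (by omega)).mpr (Or.inr ⟨p.minFac, hq, by omega, hqd, hqsq⟩)
        rw [hsp] at hfalse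
        simp at hfalse
      constructor
      · rw [pv_foldSet_size]
        exact hsz
      · intro j hj
        rw [pv_foldSet_getD]
        have hjlt : j < s.size := by omega
        simp only [pv_mem_innerRange p j (by omega) hpsq]
        by_cases hcond : p * p ≤ j ∧ j ≤ 1000000 ∧ p ∣ j
        · rw [if_pos ⟨hcond, hjlt⟩]
          constructor
          · intro _
            exact Or.inr ⟨p, hpp, by omega, hcond.2.2, hcond.1⟩
          · intro _; rfl
        · rw [if_neg (by tauto)]
          rw [hch j hj]
          constructor
          · rintro (h2 | ⟨q, hq1, hq2, hq3, hq4⟩)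
            · exact Or.inl h2
            · exact Or.inr ⟨q, hq1, by omega, hq3, hq4⟩
          · rintro (h2 | ⟨q, hq1, hq2, hq3, hq4⟩)
            · exact Or.inl h2
            · by_cases hqp : q = p
              · rw [hqp] at hq3 hq4
                exact absurd ⟨hq4, hj, hq3⟩ hcond
              · exact Or.inr ⟨q, hq1, by omega, hq3, hq4⟩
    · -- p already marked composite: nothing changes, and p cannot be prime
      rw [if_neg hsp]
      have hspf : s.getD p false = false := by
        revert hsp; cases s.getD p false <;> simp
      have hpfacts := (hch p (by omega)).mp hspf
      have hpcomp : ¬ Nat.Prime p := by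
        rcases hpfacts with h2 | ⟨q, hq1, hq2, hq3, hq4⟩
        · omega
        · intro hpp
          rcases (Nat.Prime.eq_one_or_self_of_dvd hpp q hq3) with h1 | hqp
          · rw [h1] at hq1; exact absurd hq1 Nat.not_prime_one
          · rw [hqp] at hq4
            have := Nat.mul_le_mul (le_refl p) hpp.two_le
            omega
      refine ⟨hsz, ?_⟩
      intro j hj
      rw [hch j hj]
      constructor
      · rintro (h2 | ⟨q, hq1, hq2, hq3, hq4⟩)
        · exact Or.inl h2
        · exact Or.inr ⟨q, hq1, by omega, hq3, hq4⟩
      · rintro (h2 | ⟨q, hq1, hq2, hq3, hq4⟩)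
        · exact Or.inl h2
        · by_cases hqp : q = p
          · rw [hqp] at hq1; exact absurd hq1 hpcomp
          · exact Or.inr ⟨q, hq1, by omega, hq3, hq4⟩

lemma pv_sieve_getD (j : Nat) (hj : j ≤ 1000000) :
    pvSieve.getD j false = true ↔ Nat.Prime j := by
  unfold pvSieve
  obtain ⟨hsz, hch⟩ := pv_sieve_inv 999 (le_refl _)
  have hiff := hch j hj
  constructor
  · intro ht
    have hne : ¬ (j < 2 ∨ ∃ q, Nat.Prime q ∧ q < 2 + 999 ∧ q ∣ j ∧ q * q ≤ j) := by
      intro h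
      rw [hiff.mpr h] at ht
      exact absurd ht (by simp)
    push_neg at hne
    by_contra hnp
    have h2 : 2 ≤ j := by omega
    have hq := Nat.minFac_prime (by omega : j ≠ 1)
    have hqd := Nat.minFac_dvd j
    have hqsq : j.minFac * j.minFac ≤ j := by
      simpa [Nat.pow_two] using Nat.minFac_sq_le_self (by omega) hnp
    have hq1000 : j.minFac < 1001 := by
      by_contra hge
      push_neg at hge
      have : 1001 * 1001 ≤ j.minFac * j.minFac := Nat.mul_le_mul hge hge
      omega
    have := hne.2 j.minFac hq hq1000 hqd
    omega
  · intro hpj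
    cases hgd : ((List.range' 2 999 1).foldl pvSieveStep pvSieveBase).getD j false with
    | true => rfl
    | false =>
      exfalso
      rcases hiff.mp hgd with h2 | ⟨q, hq1, _, hq3, hq4⟩
      · have := hpj.two_le; omega
      · rcases Nat.Prime.eq_one_or_self_of_dvd hpj q hq3 with h1 | hqj
        · rw [h1] at hq1; exact absurd hq1 Nat.not_prime_one
        · rw [hqj] at hq4
          have := Nat.mul_le_mul (le_refl j) hpj.two_le
          have h2 := hpj.two_le
          omega

lemma pv_sieve_size : pvSieve.size = 1000001 := by
  unfold pvSieve
  exact (pv_sieve_inv 999 (le_refl _)).1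

lemma pv_mem_primes (q : Nat) : q ∈ pvPrimes ↔ Nat.Prime q ∧ q ≤ 1000000 := by
  unfold pvPrimes
  rw [List.mem_filter, List.mem_range, pv_sieve_size]
  constructor
  · rintro ⟨hlt, hgd⟩
    have hle : q ≤ 1000000 := by omega
    exact ⟨(pv_sieve_getD q hle).mp hgd, hle⟩
  · rintro ⟨hp, hle⟩
    exact ⟨by omega, (pv_sieve_getD q hle).mpr hp⟩

lemma pv_primes_sorted : List.Pairwise (· < ·) pvPrimes :=
  List.Pairwise.sublist List.filter_sublist List.pairwise_lt_range

-- ---------- count_divisors correct ----------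
lemma pv_divOut_spec (p : Nat) (hp : 2 ≤ p) : ∀ n, 0 < n →
    n = p ^ (pvDivOut n p).1 * (pvDivOut n p).2 ∧ ¬ p ∣ (pvDivOut n p).2 ∧ 0 < (pvDivOut n p).2 := by
  intro n
  induction n using Nat.strong_induction_on with
  | _ n ih =>
    intro hn
    rw [pvDivOut]
    by_cases h : 2 ≤ p ∧ 0 < n ∧ n % p = 0
    · rw [dif_pos h]
      have hdvd : p ∣ n := Nat.dvd_of_mod_eq_zero h.2.2
      have hq : 0 < n / p := Nat.div_pos (Nat.le_of_dvd h.2.1 hdvd) (by omega)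
      have hlt : n / p < n := Nat.div_lt_self h.2.1 (by omega)
      obtain ⟨e1, e2, e3⟩ := ih (n / p) hlt hq
      refine ⟨?_, e2, e3⟩
      calc n = p * (n / p) := (Nat.mul_div_cancel' hdvd).symm
        _ = p * (p ^ (pvDivOut (n/p) p).1 * (pvDivOut (n/p) p).2) := by rw [← e1]
        _ = p ^ ((pvDivOut (n/p) p).1 + 1) * (pvDivOut (n/p) p).2 := by ring
    · rw [dif_neg h]
      have hnd : ¬ p ∣ n := by
        intro hd
        exact h ⟨hp, hn, Nat.eq_zero_of_dvd_of_lt hd |> fun _ => Nat.mod_eq_zero_of_dvd hd⟩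
      exact ⟨by simp, hnd, hn⟩

lemma pv_one_or_prime (n : Nat) (hn : 0 < n)
    (h : ∀ q, Nat.Prime q → q ∣ n → q * q ≤ n → False) : n = 1 ∨ Nat.Prime n := by
  by_cases h1 : n = 1
  · exact Or.inl h1
  · right
    by_contra hp
    exact h _ (Nat.minFac_prime h1) (Nat.minFac_dvd n)
      (by simpa [Nat.pow_two] using Nat.minFac_sq_le_self hn hp)

lemma pv_card_divisors_prime (n : Nat) (hp : Nat.Prime n) : (Nat.divisors n).card = 2 := by
  rw [hp.divisors, Finset.card_pair (by have := hp.one_lt; omega : (1:Nat) ≠ n)]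

lemma pv_card_divisors_prime_pow (p e : Nat) (hp : Nat.Prime p) :
    (Nat.divisors (p ^ e)).card = e + 1 := by
  rw [Nat.divisors_prime_pow hp]; simp

lemma pv_term (n c : Nat) (h : n = 1 ∨ Nat.Prime n) :
    (if 1 < n then c * 2 else c) = c * (Nat.divisors n).card := by
  rcases h with rfl | hp
  · simp [Nat.divisors_one]
  · simp [hp.one_lt, pv_card_divisors_prime n hp]

lemma pv_cdLoop_eq (L : List Nat) : ∀ (n c : Nat), 0 < n →
    (∀ q ∈ L, Nat.Prime q) → List.Pairwise (· < ·) L →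
    (∀ q, Nat.Prime q → q ∣ n → q * q ≤ n → q ∈ L) →
    pvCdLoop n c L = c * (Nat.divisors n).card := by
  induction L with
  | nil =>
    intro n c hn _ _ hf
    exact pv_term n c (pv_one_or_prime n hn (fun q hq hd hsq => by simpa using hf q hq hd hsq))
  | cons p ps ih =>
    intro n c hn hpr hsort hf
    have hp : Nat.Prime p := hpr p List.mem_cons_self
    simp only [pvCdLoop]
    by_cases hbr : p * p > n
    · rw [if_pos hbr]
      apply pv_term
      apply pv_one_or_prime n hn
      intro q hq hd hsq
      have hqm := hf q hq hd hsq
      have hple : p ≤ q := by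
        rcases List.mem_cons.mp hqm with rfl | hmem
        · exact le_refl _
        · exact Nat.le_of_lt ((List.pairwise_cons.mp hsort).1 q hmem)
      have : p * p ≤ q * q := Nat.mul_le_mul hple hple
      omega
    · rw [if_neg hbr]
      obtain ⟨heq, hnd, hpos⟩ := pv_divOut_spec p hp.two_le n hn
      set e := (pvDivOut n p).1 with he
      set m := (pvDivOut n p).2 with hm
      have hmdvd : m ∣ n := ⟨p ^ e, by rw [heq]; ring⟩
      have hmemb : ∀ q, Nat.Prime q → q ∣ m → q * q ≤ m → q ∈ ps := by
        intro q hq hqd hsq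
        have hqn : q ∣ n := dvd_trans hqd hmdvd
        have hmn : m ≤ n := Nat.le_of_dvd hn hmdvd
        have := hf q hq hqn (by omega)
        rcases List.mem_cons.mp this with rfl | hmem
        · exact absurd hqd hnd
        · exact hmem
      have hrec := ih m (c * (e + 1)) hpos
        (fun q hq => hpr q (List.mem_cons_of_mem _ hq)) (List.pairwise_cons.mp hsort).2 hmemb
      have hcop : Nat.Coprime (p ^ e) m := Nat.Coprime.pow_left e (hp.coprime_iff_not_dvd.mpr hnd)
      have hcard : (Nat.divisors n).card = (e + 1) * (Nat.divisors m).card := by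
        rw [heq, hcop.card_divisors_mul, pv_card_divisors_prime_pow p e hp]
      rw [hrec, hcard]; ring

lemma pv_countDivisors_eq (m : Nat) (h1 : 0 < m) (h2 : m ≤ 1000000000000) :
    pvCountDivisors m pvPrimes = (Nat.divisors m).card := by
  unfold pvCountDivisors
  by_cases h : m = 1
  · simp [h, Nat.divisors_one]
  · rw [if_neg h]
    have hmemb : ∀ q, Nat.Prime q → q ∣ m → q * q ≤ m → q ∈ pvPrimes := by
      intro q hq hqd hsq
      rw [pv_mem_primes]
      refine ⟨hq, ?_⟩
      by_contra hgt
      push_neg at hgt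
      have hbig : 1000001 * 1000001 ≤ q * q := Nat.mul_le_mul (by omega) (by omega)
      have hle : q * q ≤ 1000000000000 := le_trans hsq h2
      omega
    have := pv_cdLoop_eq pvPrimes m 1 h1
      (fun q hq => ((pv_mem_primes q).mp hq).1) pv_primes_sorted hmemb
    simpa using this

-- ---------- B's divisor count correct ----------
lemma pv_foldl_two (m : Nat) : ∀ (l : List Nat) (c : Nat),
    l.foldl (fun c i => if m % i = 0 then c + 2 else c) c
      = c + 2 * l.countP (fun i => decide (m % i = 0)) := by
  intro l
  induction l with
  | nil => intro c; simp
  | cons i t ih =>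
    intro c
    rw [List.foldl_cons, List.countP_cons]
    by_cases h : m % i = 0 <;> simp [h, ih] <;> omega

lemma pv_countP_range' (m : Nat) : ∀ r, (List.range' 1 r 1).countP (fun i => decide (m % i = 0))
    = ((Finset.range r).filter (fun j => m % (j + 1) = 0)).card := by
  intro r
  induction r with
  | zero => simp
  | succ r ih =>
    have hcat : List.range' 1 (r+1) 1 = List.range' 1 r 1 ++ [1 + r] := by
      have := List.range'_concat (s := 1) (n := r) (step := 1)
      simpa using this
    rw [hcat, List.countP_append, ih, Finset.range_add_one, Finset.filter_insert]
    by_cases hd : m % (r + 1) = 0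
    · rw [if_pos hd, Finset.card_insert_of_notMem (by simp)]
      simp [List.countP_cons, show (1 + r) = r + 1 by omega, hd]
    · rw [if_neg hd]
      simp [List.countP_cons, show (1 + r) = r + 1 by omega, hd]

lemma pv_small_card (m : Nat) (hm : 0 < m) :
    ((Finset.range (Nat.sqrt m)).filter (fun j => m % (j + 1) = 0)).card
      = ((Nat.divisors m).filter (fun d => d ≤ Nat.sqrt m)).card := by
  have hm0 : m ≠ 0 := by omega
  refine Finset.card_bij' (fun j _ => j + 1) (fun d _ => d - 1) ?_ ?_ ?_ ?_ <;> dsimp only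
  · intro a ha
    simp only [Finset.mem_filter, Finset.mem_range, Nat.mem_divisors] at ha ⊢
    exact ⟨⟨Nat.dvd_of_mod_eq_zero ha.2, hm0⟩, by omega⟩
  · intro d hd
    simp only [Finset.mem_filter, Finset.mem_range, Nat.mem_divisors] at hd ⊢
    have hd0 : d ≠ 0 := by
      rintro rfl
      exact hm0 (Nat.eq_zero_of_zero_dvd hd.1.1)
    refine ⟨by omega, ?_⟩
    rw [Nat.sub_add_cancel (by omega)]
    exact Nat.mod_eq_zero_of_dvd hd.1.1
  · intro a ha
    simp
  · intro d hd
    simp only [Finset.mem_filter, Nat.mem_divisors] at hd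
    have hd0 : d ≠ 0 := by
      rintro rfl
      exact hm0 (Nat.eq_zero_of_zero_dvd hd.1.1)
    omega

lemma pv_div_mem (m d : Nat) (hm : m ≠ 0) (hd : d ∣ m) : m / d ∈ Nat.divisors m := by
  rw [Nat.mem_divisors]
  exact ⟨Nat.div_dvd_of_dvd hd, hm⟩

lemma pv_div_le_sqrt (m d : Nat) (hm : 0 < m) (hd : d ∣ m) (hgt : Nat.sqrt m < d) :
    m / d ≤ Nat.sqrt m := by
  have hd0 : 0 < d := by
    rcases Nat.eq_zero_or_pos d with rfl | h
    · exact absurd (Nat.eq_zero_of_zero_dvd hd) (by omega)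
    · exact h
  rw [Nat.le_sqrt]
  have hdm : m / d * d = m := Nat.div_mul_cancel hd
  have hdd : m < d * d := by
    calc m < (Nat.sqrt m + 1) * (Nat.sqrt m + 1) := Nat.lt_succ_sqrt m
      _ ≤ d * d := Nat.mul_le_mul hgt hgt
  have hlt : m / d ≤ d := by
    by_contra h
    push_neg at h
    have : d * d < m / d * d := (Nat.mul_lt_mul_right hd0).mpr h
    omega
  calc m / d * (m / d) ≤ m / d * d := Nat.mul_le_mul_left _ hlt
    _ = m := hdm

lemma pv_sqrt_lt_div (m d : Nat) (hm : 0 < m) (hd : d ∣ m) (hle : d ≤ Nat.sqrt m)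
    (hne : d * d ≠ m) : Nat.sqrt m < m / d := by
  by_contra h
  push_neg at h
  have hdm : d * (m / d) = m := Nat.mul_div_cancel' hd
  have hrr : Nat.sqrt m * Nat.sqrt m ≤ m := Nat.sqrt_le m
  have hc1 : m ≤ Nat.sqrt m * Nat.sqrt m := by
    calc m = d * (m / d) := hdm.symm
      _ ≤ Nat.sqrt m * Nat.sqrt m := Nat.mul_le_mul hle h
  have hr2 : Nat.sqrt m * Nat.sqrt m = m := by omega
  have hr0 : 0 < Nat.sqrt m := Nat.sqrt_pos.mpr hm
  have hdr : d = Nat.sqrt m := by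
    by_contra hdd
    have hdlt : d < Nat.sqrt m := lt_of_le_of_ne hle hdd
    have h1 : d * (m / d) ≤ d * Nat.sqrt m := Nat.mul_le_mul_left d h
    have h2 : d * Nat.sqrt m < Nat.sqrt m * Nat.sqrt m := (Nat.mul_lt_mul_right hr0).mpr hdlt
    omega
  rw [hdr] at hne
  exact hne hr2

lemma pv_large_eq (m : Nat) (hm : 0 < m) :
    ((Nat.divisors m).filter (fun d => ¬ d ≤ Nat.sqrt m)).card
      = ((Nat.divisors m).filter (fun d => d ≤ Nat.sqrt m ∧ d * d ≠ m)).card := by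
  have hm0 : m ≠ 0 := by omega
  refine Finset.card_bij' (fun d _ => m / d) (fun d _ => m / d) ?_ ?_ ?_ ?_ <;> dsimp only
  · intro d hd
    rw [Finset.mem_filter, Nat.mem_divisors] at hd
    obtain ⟨⟨hdv, _⟩, hgt⟩ := hd
    push_neg at hgt
    rw [Finset.mem_filter]
    refine ⟨pv_div_mem m d hm0 hdv, pv_div_le_sqrt m d hm hdv hgt, ?_⟩
    intro hsq
    set r := Nat.sqrt m with hr
    have hx0 : 0 < m / d := by
      rcases Nat.eq_zero_or_pos (m / d) with h0 | h
      · rw [h0] at hsq; omega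
      · exact h
    have hse : r = m / d := by
      conv_lhs => rw [hr, ← hsq]
      exact Nat.sqrt_eq _
    have hdd : m / (m / d) = d := Nat.div_div_self hdv hm0
    rw [← hse] at hdd
    have hrr : r * r = m := by rw [hse]; exact hsq
    have hy : m / r = r := by
      conv_lhs => rw [← hrr]
      exact Nat.mul_div_cancel_left _ (by omega)
    omega
  · intro d hd
    rw [Finset.mem_filter, Nat.mem_divisors] at hd
    obtain ⟨⟨hdv, _⟩, hle, hne⟩ := hd
    rw [Finset.mem_filter]
    exact ⟨pv_div_mem m d hm0 hdv, Nat.not_le.mpr (pv_sqrt_lt_div m d hm hdv hle hne)⟩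
  · intro d hd
    rw [Finset.mem_filter, Nat.mem_divisors] at hd
    exact Nat.div_div_self hd.1.1 hm0
  · intro d hd
    rw [Finset.mem_filter, Nat.mem_divisors] at hd
    exact Nat.div_div_self hd.1.1 hm0

lemma pv_S0_square (m : Nat) (hsq : Nat.sqrt m * Nat.sqrt m = m) :
    (Nat.divisors m).filter (fun d => d ≤ Nat.sqrt m ∧ d * d ≠ m)
      = ((Nat.divisors m).filter (fun d => d ≤ Nat.sqrt m)).erase (Nat.sqrt m) := by
  ext d
  rw [Finset.mem_erase, Finset.mem_filter, Finset.mem_filter]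
  constructor
  · rintro ⟨hdv, hle, hne⟩
    refine ⟨?_, hdv, hle⟩
    intro hdr
    rw [hdr] at hne
    exact hne hsq
  · rintro ⟨hner, hdv, hle⟩
    refine ⟨hdv, hle, ?_⟩
    intro hdd
    have hse := Nat.sqrt_eq d
    rw [hdd] at hse
    exact hner hse.symm

lemma pv_S0_nonsquare (m : Nat) (hsq : Nat.sqrt m * Nat.sqrt m ≠ m) :
    (Nat.divisors m).filter (fun d => d ≤ Nat.sqrt m ∧ d * d ≠ m)
      = (Nat.divisors m).filter (fun d => d ≤ Nat.sqrt m) := by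
  ext d
  rw [Finset.mem_filter, Finset.mem_filter]
  constructor
  · rintro ⟨hdv, hle, _⟩
    exact ⟨hdv, hle⟩
  · rintro ⟨hdv, hle⟩
    refine ⟨hdv, hle, ?_⟩
    intro hdd
    have hse := Nat.sqrt_eq d
    rw [hdd] at hse
    rw [← hse] at hdd
    exact hsq hdd

lemma pv_divisorCount_eq (m : Nat) (h1 : 0 < m) :
    pvDivisorCount m = (Nat.divisors m).card := by
  have hm0 : m ≠ 0 := by omega
  simp only [pvDivisorCount]
  rw [pv_foldl_two, pv_countP_range', pv_small_card m h1]
  have hsplit := Finset.card_filter_add_card_filter_not (s := Nat.divisors m)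
    (fun d => d ≤ Nat.sqrt m)
  have hlarge := pv_large_eq m h1
  by_cases hsq : Nat.sqrt m * Nat.sqrt m = m
  · rw [if_pos hsq]
    have hrmem : Nat.sqrt m ∈ (Nat.divisors m).filter (fun d => d ≤ Nat.sqrt m) := by
      rw [Finset.mem_filter, Nat.mem_divisors]
      exact ⟨⟨⟨Nat.sqrt m, hsq.symm⟩, hm0⟩, le_refl _⟩
    have hpos : 0 < ((Nat.divisors m).filter (fun d => d ≤ Nat.sqrt m)).card :=
      Finset.card_pos.mpr ⟨_, hrmem⟩
    rw [pv_S0_square m hsq, Finset.card_erase_of_mem hrmem] at hlarge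
    omega
  · rw [if_neg hsq]
    rw [pv_S0_nonsquare m hsq] at hlarge
    omega

-- ---------- the loops agree ----------
lemma pv_halfTerm_pos (n : Nat) (hn : 0 < n) : 0 < pvHalfTerm n := by
  unfold pvHalfTerm; split <;> omega

lemma pv_loops_eq (k : Int) : ∀ (fuel n : Nat), 0 < n → fuel + n ≤ 10000000001 →
    pvLoopA k fuel n = pvLoopB k fuel n (pvDivisorCount (pvHalfTerm n)) := by
  intro fuel
  induction fuel with
  | zero => intro n _ _; rfl
  | succ fuel ih =>
    intro n hn hbound
    simp only [pvLoopA, pvLoopB]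
    have hab : (if n % 2 = 0 then (n / 2, n + 1) else (n, (n + 1) / 2))
        = (pvHalfTerm n, pvHalfTerm (n + 1)) := by
      unfold pvHalfTerm
      by_cases h : n % 2 = 0
      · rw [if_pos h, if_pos h, if_neg (by omega)]
      · rw [if_neg h, if_neg h, if_pos (by omega)]
    rw [hab]
    have h1 : 0 < pvHalfTerm n := pv_halfTerm_pos n hn
    have h2 : 0 < pvHalfTerm (n + 1) := pv_halfTerm_pos (n + 1) (by omega)
    have hb1 : pvHalfTerm n ≤ 1000000000000 := by unfold pvHalfTerm; split <;> omega
    have hb2 : pvHalfTerm (n + 1) ≤ 1000000000000 := by unfold pvHalfTerm; split <;> omega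
    rw [pv_countDivisors_eq _ h1 hb1, pv_countDivisors_eq _ h2 hb2,
      ← pv_divisorCount_eq _ h1, ← pv_divisorCount_eq _ h2]
    by_cases hk : k < ((pvDivisorCount (pvHalfTerm n) * pvDivisorCount (pvHalfTerm (n + 1)) : Nat) : Int)
    · rw [if_pos hk, if_pos hk]
    · rw [if_neg hk, if_neg hk]
      exact ih (n + 1) (by omega) (by omega)

-- ===== VERDICT (by name: the statement is the Claim_ definition above) =====
theorem find_triangle_number_with_over_k_divisors_spec : Claim_equal_find_triangle_number_with_over_k_divisors := by
  intro k _
  unfold Spec_find_triangle_number_with_over_k_divisors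
  unfold find_triangle_number_with_over_k_divisors find_triangle_number_with_over_k_divisors_alt
  exact pv_loops_eq k 10000000000 1 (by omega) (by omega)
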